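-- pv_equiv track=rewrite | github.com/InfiniteLoop360/GFG_POTD | Subset XOR.py | subsetXOR
-- ===== SOURCE A (Python) =====
-- def subsetXOR(n: int):
--     # compute XOR of 1..n
--     xor_all = 0
--     for i in range(1, n + 1):
--         xor_all ^= i
--
--     # if already equal -> full lexicographically smallest largest subset
--     if xor_all == n:
--         return list(range(1, n + 1))
--
--     # else one number must be removed
--     missing = xor_all ^ n
--
--     ans = []
--     for i in range(1, n + 1):
--         if i != missing:
--             ans.append(i)
--
--     return ans
-- ===== SOURCE B (Python) =====
-- def subsetXOR(n: int):
--     # XOR of 1..n in closed form by n % 4 (0 for n < 1, where the range is empty)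
--     if n < 1:
--         x = 0
--     else:
--         r = n % 4
--         x = n if r == 0 else 1 if r == 1 else n + 1 if r == 2 else 0
--
--     if x == n:
--         return list(range(1, n + 1))
--
--     missing = x ^ n
--     return [i for i in range(1, n + 1) if i != missing]
-- ===== Notes on version B (the rewrite author's own statement) =====
-- stated objective: faster
-- what changed: Replaces A's linear XOR-accumulation loop with the classical closed-form value of XOR over the range (a four-way case on the remainder modulo four, zero for an empty range), and builds the answer list with a single comprehension instead of an append loop.
import Mathlib
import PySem

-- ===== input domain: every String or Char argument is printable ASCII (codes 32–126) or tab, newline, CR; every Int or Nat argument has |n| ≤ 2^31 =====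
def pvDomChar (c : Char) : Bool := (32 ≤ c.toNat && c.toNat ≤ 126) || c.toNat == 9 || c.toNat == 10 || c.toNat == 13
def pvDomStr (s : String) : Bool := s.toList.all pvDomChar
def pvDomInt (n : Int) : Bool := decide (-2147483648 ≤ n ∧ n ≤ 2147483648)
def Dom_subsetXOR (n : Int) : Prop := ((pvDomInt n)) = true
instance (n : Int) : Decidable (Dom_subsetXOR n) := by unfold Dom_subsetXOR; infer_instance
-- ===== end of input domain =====

-- B replaces A's linear XOR-accumulation loop by the closed-form XOR of the range (four-way case on the remainder modulo four),
-- and builds the answer with a single comprehension/filter instead of an append loop.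

-- ===== PORT A =====
def subsetXOR (n : Int) : List Int :=
  -- xor_all = 0; for i in range(1, n+1): xor_all ^= i
  let xorAll := (PySem.List.pyRange 1 (n+1) 1).foldl (fun a i => PySem.Int.bxor a i) 0
  if xorAll = n then PySem.List.pyRange 1 (n+1) 1
  else
    let missing := PySem.Int.bxor xorAll n
    -- ans = []; for i in range(1, n+1): if i != missing: ans.append(i)
    (PySem.List.pyRange 1 (n+1) 1).foldl (fun acc i => if i ≠ missing then acc ++ [i] else acc) []

-- ===== PORT B =====
-- closed-form XOR of 1..n: 0 for n < 1 (empty range), else chosen by n % 4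
def xorClosed (n : Int) : Int :=
  if n < 1 then 0
  else
    let r := PySem.Int.mod n 4
    if r = 0 then n else if r = 1 then 1 else if r = 2 then n + 1 else 0

def subsetXOR_alt (n : Int) : List Int :=
  let x := xorClosed n
  if x = n then PySem.List.pyRange 1 (n+1) 1
  else (PySem.List.pyRange 1 (n+1) 1).filter (fun i => i ≠ PySem.Int.bxor x n)

-- ===== PRECONDITION & SPEC =====
def Spec_subsetXOR (n : Int) (out : List Int) : Prop := out = subsetXOR_alt n
instance (n : Int) (out : List Int) : Decidable (Spec_subsetXOR n out) := by unfold Spec_subsetXOR; infer_instance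

-- ===== CLAIM (what is proved, stated in full; the proofs are below) =====
def Claim_equal_subsetXOR : Prop := ∀ (n : Int), Dom_subsetXOR n → Spec_subsetXOR n (subsetXOR n)

-- ===== LEMMAS AND PROOFS =====

-- an even natural XORed with 1 gains its lowest bit
lemma nat_even_xor_one (j : Nat) : (2*j) ^^^ 1 = 2*j + 1 := by
  apply Nat.eq_of_testBit_eq
  intro i
  cases i with
  | zero => simp [Nat.testBit_zero]
  | succ i => simp [Nat.testBit_succ, Nat.mul_add_div]

-- one step of the closed form: xorClosed n ^ (n+1) = xorClosed (n+1) for n ≥ 1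
lemma xorClosed_step (m : Nat) (h : 1 ≤ (m:Int)) :
    PySem.Int.bxor (xorClosed (m:Int)) ((m:Int)+1) = xorClosed ((m:Int)+1) := by
  have h1 : ¬ ((m:Int) < 1) := by omega
  have h2 : ¬ ((m:Int) + 1 < 1) := by omega
  have hm4 : PySem.Int.mod (m:Int) 4 = ((m % 4 : Nat) : Int) := PySem.Int.mod_natCast m 4
  have hm4' : PySem.Int.mod ((m:Int)+1) 4 = (((m+1) % 4 : Nat) : Int) := by
    have := PySem.Int.mod_natCast (m+1) 4; push_cast at this ⊢; omega
  unfold xorClosed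
  simp only [h1, h2, if_false, hm4, hm4']
  have : m % 4 = 0 ∨ m % 4 = 1 ∨ m % 4 = 2 ∨ m % 4 = 3 := by omega
  rcases this with h4 | h4 | h4 | h4
  · -- m ≡ 0: m even, so m ^ (m+1) = 1
    obtain ⟨j, hj⟩ : ∃ j, m = 2*j := ⟨m/2, by omega⟩
    have hx : PySem.Int.bxor (m:Int) ((m:Int)+1) = ((m ^^^ (m+1) : Nat) : Int) := by
      have := PySem.Int.bxor_natCast m (m+1); push_cast at this ⊢; omega
    have : m ^^^ (m+1) = 1 := by
      subst hj
      calc (2*j) ^^^ (2*j+1) = (2*j) ^^^ ((2*j) ^^^ 1) := by rw [nat_even_xor_one]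
        _ = 1 := by rw [← Nat.xor_assoc, Nat.xor_self, Nat.zero_xor]
    have h41 : (m+1) % 4 = 1 := by omega
    simp [h4, h41, hx, this]
  · -- m ≡ 1: m+1 even, so 1 ^ (m+1) = m+2
    obtain ⟨j, hj⟩ : ∃ j, m + 1 = 2*j := ⟨(m+1)/2, by omega⟩
    have hx : PySem.Int.bxor (1:Int) ((m:Int)+1) = ((1 ^^^ (m+1) : Nat) : Int) := by
      have := PySem.Int.bxor_natCast 1 (m+1); push_cast at this ⊢; omega
    have : 1 ^^^ (m+1) = m + 2 := by
      rw [Nat.xor_comm, hj, nat_even_xor_one]; omega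
    have h42 : (m+1) % 4 = 2 := by omega
    simp [h4, h42, hx, this]
    ring
  · -- m ≡ 2: (m+1) ^ (m+1) = 0
    have h43 : (m+1) % 4 = 3 := by omega
    simp [h4, h43, PySem.Int.bxor_self]
  · -- m ≡ 3: 0 ^ (m+1) = m+1
    have h40 : (m+1) % 4 = 0 := by omega
    have hx : PySem.Int.bxor (0:Int) ((m:Int)+1) = (m:Int)+1 := by
      rw [PySem.Int.bxor_comm]; exact PySem.Int.bxor_zero _
    simp [h4, h40, hx]

-- A's accumulation loop computes the closed form
lemma xorFold_eq (n : Int) :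
    (PySem.List.pyRange 1 (n+1) 1).foldl (fun a i => PySem.Int.bxor a i) 0 = xorClosed n := by
  rcases lt_or_ge n 1 with h | h
  · have : PySem.List.pyRange 1 (n+1) 1 = [] := by
      simp [PySem.List.pyRange]; omega
    simp [this, xorClosed, h]
  · obtain ⟨m, rfl⟩ : ∃ m : Nat, n = (m:Int) := ⟨n.toNat, by omega⟩
    induction m with
    | zero => simp at h
    | succ k ih =>
      rcases Nat.eq_or_lt_of_le (by exact_mod_cast h : 1 ≤ k+1) with hk | hk
      · have : k = 0 := by omega
        subst this
        decide
      · have hk1 : 1 ≤ (k:Int) := by exact_mod_cast Nat.lt_succ_iff.mp hk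
        have hrange : PySem.List.pyRange 1 ((k:Int)+1+1) 1
            = PySem.List.pyRange 1 ((k:Int)+1) 1 ++ [(k:Int)+1] := by
          have := PySem.List.pyRange_one_succ_right (a := 1) (b := (k:Int)+1) (by omega)
          simpa using this
        have hcast : ((k+1 : Nat) : Int) = (k:Int) + 1 := by push_cast; omega
        rw [hcast, hrange, List.foldl_append, ih hk1]
        simpa using xorClosed_step k hk1

-- ===== VERDICT (by name: the statement is the Claim_ definition above) =====
theorem subsetXOR_spec : Claim_equal_subsetXOR := by
  intro n _
  unfold Spec_subsetXOR subsetXOR subsetXOR_alt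
  simp only []
  rw [xorFold_eq]
  by_cases h : xorClosed n = n
  · simp [h]
  · simp only [if_neg h]
    rw [PySem.List.foldl_append_ite_eq_filter]
    simp
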